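-- pv_equiv track=rewrite | github.com/carlosfreires/carlosfreires | scripts/generate_apis_nasa.py | escape_svg
-- ===== SOURCE A (Python) =====
-- def escape_svg(text, max_length=100):
--     """Escapa caracteres especiais para SVG"""
--     if not text:
--         return ""
--     replacements = {
--         '&': '&amp;',
--         '<': '&lt;',
--         '>': '&gt;',
--         '"': '&quot;',
--         "'": '&apos;'
--     }
--     for char, replacement in replacements.items():
--         text = text.replace(char, replacement)
--
--     return text[:max_length] + "..." if len(text) > max_length else text
-- ===== SOURCE B (Python) =====
-- def escape_svg(text, max_length=100):
--     """Escapa caracteres especiais para SVG"""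
--     if not text:
--         return ""
--     mapping = {
--         '&': '&amp;',
--         '<': '&lt;',
--         '>': '&gt;',
--         '"': '&quot;',
--         "'": '&apos;'
--     }
--     escaped = ''.join(mapping.get(ch, ch) for ch in text)
--     return escaped[:max_length] + "..." if len(escaped) > max_length else escaped
-- ===== Notes on version B (the rewrite author's own statement) =====
-- stated objective: idiomatic
-- what changed: Replaces A's five sequential full-string str.replace passes with a single pass over the characters that joins mapping.get(ch, ch), so each character is escaped exactly once in one scan.
import Mathlib
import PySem

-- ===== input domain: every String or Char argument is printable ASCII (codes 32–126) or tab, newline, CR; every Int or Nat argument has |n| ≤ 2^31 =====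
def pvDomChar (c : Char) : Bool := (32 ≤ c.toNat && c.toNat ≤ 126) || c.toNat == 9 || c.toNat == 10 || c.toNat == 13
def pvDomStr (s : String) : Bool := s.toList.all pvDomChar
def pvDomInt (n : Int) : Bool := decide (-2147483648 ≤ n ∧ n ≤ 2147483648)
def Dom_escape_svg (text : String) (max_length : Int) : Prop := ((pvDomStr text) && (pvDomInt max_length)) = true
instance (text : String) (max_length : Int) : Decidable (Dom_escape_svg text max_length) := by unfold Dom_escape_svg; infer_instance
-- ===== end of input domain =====

-- B escapes in ONE pass over the characters (''.join of mapping.get(ch, ch)) instead of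
-- A's five sequential full-string str.replace passes; same guard and truncation (idiomatic).


-- ===== PORT A =====
-- the dict iterated by A's for-loop, as an association list in insertion order
def escapeSvgReplacements : List (String × String) :=
  [("&", "&amp;"), ("<", "&lt;"), (">", "&gt;"), ("\"", "&quot;"), ("'", "&apos;")]

def escape_svg (text : String) (max_length : Int) : String :=
  if text = "" then ""
  else
    -- for char, replacement in replacements.items(): text = text.replace(char, replacement)
    let t := escapeSvgReplacements.foldl (fun acc p => PySem.Str.replace acc p.1 p.2) text
    -- return text[:max_length] + "..." if len(text) > max_length else text
    if ((PySem.Str.len t : Int) > max_length) then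
      String.ofList ((PySem.Chars.slice t.toList none (some max_length)) ++ "...".toList)
    else t

-- ===== PORT B =====
-- mapping.get(ch, ch) of Source B, yielding the (list of) output characters for one input char
def escapeSvgChar (c : Char) : List Char :=
  if c = '&' then "&amp;".toList
  else if c = '<' then "&lt;".toList
  else if c = '>' then "&gt;".toList
  else if c = '"' then "&quot;".toList
  else if c = '\'' then "&apos;".toList
  else [c]

def escape_svg_alt (text : String) (max_length : Int) : String :=
  if text = "" then ""
  else
    -- escaped = ''.join(mapping.get(ch, ch) for ch in text)
    let escaped := text.toList.flatMap escapeSvgChar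
    -- return escaped[:max_length] + "..." if len(escaped) > max_length else escaped
    if ((escaped.length : Int) > max_length) then
      String.ofList ((PySem.Chars.slice escaped none (some max_length)) ++ "...".toList)
    else String.ofList escaped

-- ===== PRECONDITION & SPEC =====
def Spec_escape_svg (text : String) (max_length : Int) (out : String) : Prop := out = escape_svg_alt text max_length
instance (text : String) (max_length : Int) (out : String) : Decidable (Spec_escape_svg text max_length out) := by unfold Spec_escape_svg; infer_instance

-- ===== CLAIM (what is proved, stated in full; the proofs are below) =====
def Claim_equal_escape_svg : Prop := ∀ (text : String) (max_length : Int), Dom_escape_svg text max_length → Spec_escape_svg text max_length (escape_svg text max_length)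

-- ===== LEMMAS AND PROOFS =====

-- replacing a SINGLE character is a flatMap over the characters
theorem replace_go_single (ch : Char) (new : List Char) :
    ∀ (fuel : Nat) (l acc : List Char), l.length ≤ fuel →
      PySem.Chars.replace.go [ch] new fuel l acc
        = acc.reverse ++ l.flatMap (fun c => if c = ch then new else [c]) := by
  intro fuel
  induction fuel with
  | zero =>
    intro l acc h
    have : l = [] := List.length_eq_zero_iff.mp (Nat.le_zero.mp h)
    subst this
    simp [PySem.Chars.replace.go]
  | succ n ih =>
    intro l acc h
    cases l with
    | nil => simp [PySem.Chars.replace.go]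
    | cons c t =>
      by_cases hc : c = ch
      · subst hc
        have hpre : List.isPrefixOf [c] (c :: t) = true := by
          simp [List.isPrefixOf]
        simp only [PySem.Chars.replace.go, hpre, if_pos]
        rw [ih _ _ (by simpa using Nat.le_of_succ_le_succ h)]
        simp
      · have hpre : List.isPrefixOf [ch] (c :: t) = false := by
          simp only [List.isPrefixOf, Bool.and_eq_false_iff]
          left
          exact decide_eq_false (fun e => absurd e.symm hc)
        simp only [PySem.Chars.replace.go, hpre, Bool.false_eq_true, if_false]
        rw [ih _ _ (by simpa using Nat.le_of_succ_le_succ h)]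
        simp [hc]

theorem replace_single (ch : Char) (new l : List Char) :
    PySem.Chars.replace l [ch] new = l.flatMap (fun c => if c = ch then new else [c]) := by
  simp only [PySem.Chars.replace, List.isEmpty_cons, Bool.false_eq_true, if_false]
  exact replace_go_single ch new l.length l [] (le_refl _)

-- pointwise: A's five-pass chain applied to a single character gives exactly B's mapping
theorem chain_point (c : Char) :
    (((((([c].flatMap (fun d => if d = '&' then "&amp;".toList else [d])).flatMap
        (fun d => if d = '<' then "&lt;".toList else [d])).flatMap
        (fun d => if d = '>' then "&gt;".toList else [d])).flatMap
        (fun d => if d = '"' then "&quot;".toList else [d])).flatMap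
        (fun d => if d = '\'' then "&apos;".toList else [d]))) = escapeSvgChar c := by
  by_cases h1 : c = '&'
  · subst h1; decide
  by_cases h2 : c = '<'
  · subst h2; decide
  by_cases h3 : c = '>'
  · subst h3; decide
  by_cases h4 : c = '"'
  · subst h4; decide
  by_cases h5 : c = '\''
  · subst h5; decide
  simp [escapeSvgChar, h1, h2, h3, h4, h5]

-- the whole five-pass chain on a list equals the single-pass flatMap
theorem chain_eq (l : List Char) :
    ((((l.flatMap (fun d => if d = '&' then "&amp;".toList else [d])).flatMap
        (fun d => if d = '<' then "&lt;".toList else [d])).flatMap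
        (fun d => if d = '>' then "&gt;".toList else [d])).flatMap
        (fun d => if d = '"' then "&quot;".toList else [d])).flatMap
        (fun d => if d = '\'' then "&apos;".toList else [d]) = l.flatMap escapeSvgChar := by
  induction l with
  | nil => simp
  | cons c t ih =>
    simp only [List.flatMap_cons, List.flatMap_append]
    rw [ih]
    have := chain_point c
    simp only [List.flatMap_cons, List.flatMap_nil, List.append_nil] at this ⊢
    rw [this]

-- A's escaped string, char-wise, equals B's escaped list
theorem escaped_toList (text : String) :
    (escapeSvgReplacements.foldl (fun acc p => PySem.Str.replace acc p.1 p.2) text).toList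
      = text.toList.flatMap escapeSvgChar := by
  simp only [escapeSvgReplacements, List.foldl_cons, List.foldl_nil]
  simp only [PySem.Str.toList_replace]
  have h1 : "&".toList = ['&'] := by decide
  have h2 : "<".toList = ['<'] := by decide
  have h3 : ">".toList = ['>'] := by decide
  have h4 : "\"".toList = ['"'] := by decide
  have h5 : "'".toList = ['\''] := by decide
  rw [h1, h2, h3, h4, h5]
  simp only [replace_single]
  rw [chain_eq]

-- ===== VERDICT (by name: the statement is the Claim_ definition above) =====
theorem escape_svg_spec : Claim_equal_escape_svg := by
  intro text max_length _
  unfold Spec_escape_svg escape_svg escape_svg_alt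
  by_cases h : text = ""
  · simp [h]
  · simp only [h, ite_false]
    have hl := escaped_toList text
    rw [PySem.Str.len_eq, hl]
    by_cases hlen : ((text.toList.flatMap escapeSvgChar).length : Int) > max_length
    · simp only [hlen, if_pos]
    · simp only [hlen, ite_false]
      have := congrArg String.ofList hl
      rw [← this]
      exact String.ofList_toList.symm
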